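-- pv_equiv track=rewrite | github.com/Pro0f/devscontext | src/devscontext/adapters/fireflies.py | _format_sentence_range
-- ===== SOURCE A (Python) =====
-- from typing import TYPE_CHECKING, Any, ClassVar
--
-- def _format_sentence_range(
--
--     sentences: list[dict[str, Any]],
--     indices: list[int],
-- ) -> str:
--     """Format a range of sentences with speaker names.
--
--     Args:
--         sentences: All sentences from the transcript.
--         indices: Indices of sentences to include.
--
--     Returns:
--         Formatted string with speaker attributions.
--     """
--     parts: list[str] = []
--     current_speaker: str | None = None
--
--     for idx in indices:
--         sentence = sentences[idx]
--         speaker = sentence.get("speaker_name", "Unknown")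
--         text = sentence.get("text", "").strip()
--
--         if not text:
--             continue
--
--         if speaker != current_speaker:
--             if parts:
--                 parts.append("")  # Add blank line between speakers
--             parts.append(f"**{speaker}:** {text}")
--             current_speaker = speaker
--         else:
--             parts.append(text)
--
--     return "\n".join(parts)
-- ===== SOURCE B (Python) =====
-- from typing import Any
--
--
-- def _fragment(prev: "str | None", speaker: str, text: str) -> str:
--     """Self-contained contribution of one sentence, given only the previous speaker."""
--     if prev == speaker:
--         return "\n" + text
--     head = f"**{speaker}:** {text}"
--     return head if prev is None else "\n\n" + head
--
--
-- def _format_sentence_range(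
--     sentences: list[dict[str, Any]],
--     indices: list[int],
-- ) -> str:
--     # Stage 1: the kept (speaker, text) pairs.
--     pairs = [
--         (d.get("speaker_name", "Unknown"), t)
--         for d in (sentences[i] for i in indices)
--         if (t := d.get("text", "").strip())
--     ]
--     # Stage 2: stateless map over each pair zipped with its predecessor's speaker,
--     # each element rendering its own separator; plain concatenation, no join("\n").
--     prevs = [None] + [s for s, _ in pairs]
--     return "".join(_fragment(p, s, t) for (s, t), p in zip(pairs, prevs))
-- ===== Notes on version B (the rewrite author's own statement) =====
-- stated objective: alternative
-- what changed: Replaces A's stateful accumulator loop (parts list plus current_speaker, blank-line elements, '\n'.join) by a stateless map: build the kept (speaker,text) pairs, zip each with its predecessor's speaker, let every element render its own fragment including its own separator ('\n\n**s:** t' on a speaker change, '\n'+t otherwise), and concatenate with ''.join.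
import Mathlib
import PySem

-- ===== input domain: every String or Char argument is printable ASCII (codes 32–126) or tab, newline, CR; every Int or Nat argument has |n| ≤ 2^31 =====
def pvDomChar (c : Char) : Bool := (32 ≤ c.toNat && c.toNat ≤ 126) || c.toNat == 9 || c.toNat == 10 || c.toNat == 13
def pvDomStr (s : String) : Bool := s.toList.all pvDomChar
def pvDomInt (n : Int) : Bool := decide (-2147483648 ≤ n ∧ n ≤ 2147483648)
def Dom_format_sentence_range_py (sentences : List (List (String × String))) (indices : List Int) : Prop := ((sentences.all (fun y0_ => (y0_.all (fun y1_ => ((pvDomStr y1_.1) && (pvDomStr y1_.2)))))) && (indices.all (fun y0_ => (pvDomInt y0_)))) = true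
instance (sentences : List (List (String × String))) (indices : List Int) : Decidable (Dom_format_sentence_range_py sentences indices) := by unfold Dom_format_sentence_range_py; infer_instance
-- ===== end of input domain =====

-- B replaces A's stateful accumulator loop (parts list + current_speaker, joined with "\n") by a
-- stateless per-element map: each kept sentence, zipped with its predecessor's speaker, renders its
-- own fragment including its separator, and the fragments are concatenated; objective: alternative.

-- ===== PORT A =====
-- the loop over indices, state = (parts, current_speaker)
def fsrLoopA (sentences : List (List (String × String))) :
    List Int → List String → Option String → List String
  | [], parts, _ => parts
  | idx :: rest, parts, cur =>
    match PySem.List.pyGet? sentences idx with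
    | none => parts   -- IndexError in Python; excluded by Pre_
    | some sentence =>
      let speaker := PySem.Dict.getD (PySem.Dict.mk sentence) "speaker_name" "Unknown"
      let text := PySem.Str.strip (PySem.Dict.getD (PySem.Dict.mk sentence) "text" "")
      if text = "" then fsrLoopA sentences rest parts cur
      else if some speaker ≠ cur then
        let parts := if parts ≠ [] then parts ++ [""] else parts
        fsrLoopA sentences rest (parts ++ ["**" ++ speaker ++ ":** " ++ text]) (some speaker)
      else
        fsrLoopA sentences rest (parts ++ [text]) cur

def format_sentence_range_py (sentences : List (List (String × String))) (indices : List Int) : String :=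
  PySem.Str.join "\n" (fsrLoopA sentences indices [] none)

-- ===== PORT B =====
-- stage 1 of Source B: the kept (speaker, text) pairs (one comprehension over indices)
def fsrPair (sentences : List (List (String × String))) (idx : Int) : Option (String × String) :=
  (PySem.List.pyGet? sentences idx).bind (fun d =>   -- IndexError in Python; excluded by Pre_
    let t := PySem.Str.strip (PySem.Dict.getD (PySem.Dict.mk d) "text" "")
    if t = "" then none
    else some (PySem.Dict.getD (PySem.Dict.mk d) "speaker_name" "Unknown", t))

-- Source B's _fragment: the self-contained contribution of one pair given only the previous speaker
def fsrFrag (prev : Option String) (speaker text : String) : String :=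
  if prev = some speaker then "\n" ++ text
  else
    let head := "**" ++ speaker ++ ":** " ++ text
    match prev with
    | none => head
    | some _ => "\n\n" ++ head

def format_sentence_range_py_alt (sentences : List (List (String × String))) (indices : List Int) : String :=
  let pairs := indices.filterMap (fsrPair sentences)
  let prevs : List (Option String) := none :: pairs.map (fun p => some p.1)
  PySem.Str.join "" ((pairs.zip prevs).map (fun z => fsrFrag z.2 z.1.1 z.1.2))

-- ===== PRECONDITION & SPEC =====
-- Pre_ excludes exactly the inputs where Python raises IndexError (an index outside [-len, len)).
def Pre_format_sentence_range_py (sentences : List (List (String × String))) (indices : List Int) : Prop :=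
  ∀ i ∈ indices, PySem.Raise.InRange sentences.length i
instance (sentences : List (List (String × String))) (indices : List Int) : Decidable (Pre_format_sentence_range_py sentences indices) := by unfold Pre_format_sentence_range_py; infer_instance

def pvWitness_format_sentence_range_py : (List (List (String × String))) × List Int :=
  ([[("speaker_name", "Alice"), ("text", " hi ")], [("text", "there")]], [0, 1, 0])

def Spec_format_sentence_range_py (sentences : List (List (String × String))) (indices : List Int) (out : String) : Prop := out = format_sentence_range_py_alt sentences indices
instance (sentences : List (List (String × String))) (indices : List Int) (out : String) : Decidable (Spec_format_sentence_range_py sentences indices out) := by unfold Spec_format_sentence_range_py; infer_instance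

-- ===== CLAIM (what is proved, stated in full; the proofs are below) =====
def Claim_equal_format_sentence_range_py : Prop := ∀ (sentences : List (List (String × String))) (indices : List Int), Dom_format_sentence_range_py sentences indices → Pre_format_sentence_range_py sentences indices → Spec_format_sentence_range_py sentences indices (format_sentence_range_py sentences indices)

-- ===== LEMMAS AND PROOFS =====

-- string-level join facts
theorem sjoin_nil (sep : String) : PySem.Str.join sep [] = "" := by
  simp [PySem.Str.join, PySem.Chars.join_nil]

theorem sjoin_singleton (sep a : String) : PySem.Str.join sep [a] = a := by
  simp [PySem.Str.join, PySem.Chars.join_singleton]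

theorem sjoin_cons_cons (sep a b : String) (rest : List String) :
    PySem.Str.join sep (a :: b :: rest) = a ++ sep ++ PySem.Str.join sep (b :: rest) := by
  simp [PySem.Str.join, PySem.Chars.join_cons_cons, String.append_assoc]

theorem sjoinE_cons (a : String) (rest : List String) :
    PySem.Str.join "" (a :: rest) = a ++ PySem.Str.join "" rest := by
  cases rest with
  | nil => simp [sjoin_singleton, sjoin_nil]
  | cons b r => rw [sjoin_cons_cons]; simp

theorem sjoin_cons_ne (sep a : String) (rest : List String) (h : rest ≠ []) :
    PySem.Str.join sep (a :: rest) = a ++ sep ++ PySem.Str.join sep rest := by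
  cases rest with
  | nil => exact absurd rfl h
  | cons b r => exact sjoin_cons_cons sep a b r

theorem sjoinNL_append (parts : List String) (x : String) (h : parts ≠ []) :
    PySem.Str.join "\n" (parts ++ [x]) = PySem.Str.join "\n" parts ++ "\n" ++ x := by
  induction parts with
  | nil => exact absurd rfl h
  | cons a rest ih =>
    by_cases hr : rest = []
    · subst hr; simp [sjoin_cons_cons, sjoin_singleton]
    · have e : (a :: rest) ++ [x] = a :: (rest ++ [x]) := rfl
      rw [e, sjoin_cons_ne "\n" a (rest ++ [x]) (by simp [hr]),
        sjoin_cons_ne "\n" a rest hr, ih hr]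
      simp [String.append_assoc]

-- A's loop on the pair level
def fsrLoopP : List (String × String) → List String → Option String → List String
  | [], parts, _ => parts
  | (s, t) :: rest, parts, cur =>
    if some s ≠ cur then
      let parts := if parts ≠ [] then parts ++ [""] else parts
      fsrLoopP rest (parts ++ ["**" ++ s ++ ":** " ++ t]) (some s)
    else
      fsrLoopP rest (parts ++ [t]) cur

theorem fsrLoopA_eq_loopP (sentences : List (List (String × String))) (indices : List Int)
    (parts : List String) (cur : Option String)
    (hpre : ∀ i ∈ indices, PySem.Raise.InRange sentences.length i) :
    fsrLoopA sentences indices parts cur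
      = fsrLoopP (indices.filterMap (fsrPair sentences)) parts cur := by
  induction indices generalizing parts cur with
  | nil => simp [fsrLoopA, fsrLoopP]
  | cons idx rest ih =>
    have hin : PySem.Raise.InRange sentences.length idx := hpre idx (by simp)
    have hrest : ∀ i ∈ rest, PySem.Raise.InRange sentences.length i :=
      fun i hi => hpre i (by simp [hi])
    obtain ⟨sentence, hs⟩ : ∃ v, PySem.List.pyGet? sentences idx = some v := by
      cases h : PySem.List.pyGet? sentences idx with
      | none => exact absurd hin ((PySem.List.pyGet?_eq_none_iff _ _).mp h)
      | some v => exact ⟨v, rfl⟩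
    simp only [fsrLoopA, List.filterMap_cons, fsrPair, hs, Option.bind_some]
    split
    · exact ih _ _ hrest
    · simp only [fsrLoopP]
      split
      · exact ih _ _ hrest
      · exact ih _ _ hrest

-- B's result, computed recursively carrying the previous speaker
def fsrCat : Option String → List (String × String) → String
  | _, [] => ""
  | prev, (s, t) :: rest => fsrFrag prev s t ++ fsrCat (some s) rest

theorem fsrZip_eq_cat (pairs : List (String × String)) (prev : Option String) :
    PySem.Str.join "" ((pairs.zip (prev :: pairs.map (fun p => some p.1))).map
        (fun z => fsrFrag z.2 z.1.1 z.1.2))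
      = fsrCat prev pairs := by
  induction pairs generalizing prev with
  | nil => simp [fsrCat, sjoin_nil]
  | cons p rest ih =>
    obtain ⟨s, t⟩ := p
    simp only [List.map_cons, List.zip_cons_cons, fsrCat]
    rw [sjoinE_cons, ih (some s)]

theorem fsrLoopP_cat (pairs : List (String × String)) (s : String) (parts : List String)
    (hne : parts ≠ []) :
    PySem.Str.join "\n" (fsrLoopP pairs parts (some s))
      = PySem.Str.join "\n" parts ++ fsrCat (some s) pairs := by
  induction pairs generalizing s parts with
  | nil => simp [fsrLoopP, fsrCat]
  | cons x rest ih =>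
    obtain ⟨s', t⟩ := x
    by_cases hss : s' = s
    · subst hss
      rw [show fsrLoopP ((s', t) :: rest) parts (some s')
            = fsrLoopP rest (parts ++ [t]) (some s') by simp [fsrLoopP]]
      rw [ih s' (parts ++ [t]) (by simp), sjoinNL_append parts t hne]
      simp [fsrCat, fsrFrag, String.append_assoc]
    · rw [show fsrLoopP ((s', t) :: rest) parts (some s)
            = fsrLoopP rest ((parts ++ [""]) ++ ["**" ++ s' ++ ":** " ++ t]) (some s') by
          simp [fsrLoopP, hne, (by simp [hss] : some s' ≠ some s)]]
      rw [ih s' _ (by simp), sjoinNL_append _ _ (by simp), sjoinNL_append parts "" hne]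
      simp only [fsrCat, fsrFrag, if_neg (by simp [(Ne.symm hss : s ≠ s')] : ¬ ((some s : Option String) = some s'))]
      have h2 : ("\n" : String) ++ "\n" = "\n\n" := by decide
      simp [String.append_assoc, ← h2]

theorem fsrLoopP_none_cat (pairs : List (String × String)) :
    PySem.Str.join "\n" (fsrLoopP pairs [] none) = fsrCat none pairs := by
  cases pairs with
  | nil => simp [fsrLoopP, fsrCat, sjoin_nil]
  | cons x rest =>
    obtain ⟨s, t⟩ := x
    simp only [fsrLoopP, if_pos (by simp : some s ≠ (none : Option String)),
      if_neg (by simp : ¬ ([] : List String) ≠ []), List.nil_append]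
    rw [fsrLoopP_cat rest s _ (by simp), sjoin_singleton]
    simp [fsrCat, fsrFrag]

-- ===== VERDICT (by name: the statement is the Claim_ definition above) =====
theorem format_sentence_range_py_spec : Claim_equal_format_sentence_range_py := by
  intro sentences indices _ hpre
  unfold Spec_format_sentence_range_py format_sentence_range_py format_sentence_range_py_alt
  rw [fsrLoopA_eq_loopP sentences indices [] none hpre, fsrZip_eq_cat, fsrLoopP_none_cat]
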